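-- pv_equiv track=rewrite | github.com/Verruckterdrachen/transcription-project | scripts/vocab/clean_dicts.py | deduplicate_case_insensitive
-- ===== SOURCE A (Python) =====
-- from collections import Counter
--
-- def deduplicate_case_insensitive(terms: list[str]) -> list[str]:
--     """
--     Дедупликация с сохранением наилучшего варианта капитализации.
--     """
--     freq = Counter(t.lower() for t in terms)
--
--     variants: dict[str, list[str]] = {}
--     for term in terms:
--         lower = term.lower()
--         if lower not in variants:
--             variants[lower] = []
--         variants[lower].append(term)
--
--     best_variant: dict[str, str] = {}
--
--     for lower, term_list in variants.items():
--         title_case = [t for t in term_list if t.istitle()]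
--         first_capital = [t for t in term_list if t[0].isupper()]
--
--         if title_case:
--             best_variant[lower] = title_case[0]
--         elif first_capital:
--             best_variant[lower] = first_capital[0]
--         else:
--             best_variant[lower] = term_list[0]
--
--     result = sorted(
--         best_variant.values(),
--         key=lambda t: (-freq[t.lower()], t.lower())
--     )
--
--     return result
-- ===== SOURCE B (Python) =====
-- def deduplicate_case_insensitive(terms: list[str]) -> list[str]:
--     """One pass: per lowercase key, count frequency and keep the first title-cased,
--     first initial-capital and first-seen variants; then pick best and sort once."""
--     count: dict[str, int] = {}
--     cand: dict[str, tuple] = {}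
--     for term in terms:
--         lower = term.lower()
--         count[lower] = count.get(lower, 0) + 1
--         is_title = term.istitle()
--         is_upper = term[0].isupper()
--         if lower in cand:
--             title, upper, first = cand[lower]
--             if title is None and is_title:
--                 title = term
--             if upper is None and is_upper:
--                 upper = term
--             cand[lower] = (title, upper, first)
--         else:
--             cand[lower] = (term if is_title else None,
--                            term if is_upper else None,
--                            term)
--     best = [t if t is not None else (u if u is not None else f)
--             for (t, u, f) in cand.values()]
--     return sorted(best, key=lambda s: (-count[s.lower()], s.lower()))
-- ===== Notes on version B (the rewrite author's own statement) =====
-- stated objective: alternative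
-- what changed: Replaces A's three passes (Counter, a grouping dict of all variants, then a collect-then-filter selection per group) by a single online pass that counts and keeps only the first title-cased / first initial-capital / first-seen variant per lowercase key, picking the best afterwards.
import Mathlib
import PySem

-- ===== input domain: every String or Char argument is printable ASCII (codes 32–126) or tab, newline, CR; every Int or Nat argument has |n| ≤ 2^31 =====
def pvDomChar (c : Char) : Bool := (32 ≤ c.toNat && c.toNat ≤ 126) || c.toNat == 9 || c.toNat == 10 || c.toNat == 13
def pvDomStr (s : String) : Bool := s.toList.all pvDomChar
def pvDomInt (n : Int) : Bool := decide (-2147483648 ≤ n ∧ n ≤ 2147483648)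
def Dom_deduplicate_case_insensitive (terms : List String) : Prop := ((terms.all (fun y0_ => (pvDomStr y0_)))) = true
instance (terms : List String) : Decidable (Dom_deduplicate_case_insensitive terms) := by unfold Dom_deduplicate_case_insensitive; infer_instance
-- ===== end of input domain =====

-- B replaces A's three separate passes (Counter, grouping dict, collect-then-filter selection)
-- by one online pass that counts and keeps per-key first-seen candidates; objective: simpler/alternative.

-- ===== PORT A =====
-- shared port of the Python builtin str.istitle() (exact on the printable-ASCII domain,
-- where the cased characters are exactly the letters): uppercase may not follow a cased
-- character, lowercase must follow a cased character, and at least one cased char is required.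
def pyIstitleAux : List Char → Bool → Bool → Bool
  | [], _, found => found
  | c :: rest, prevCased, found =>
    if PySem.Chars.isupper c then
      if prevCased then false else pyIstitleAux rest true true
    else if PySem.Chars.islower c then
      if prevCased then pyIstitleAux rest true true else false
    else pyIstitleAux rest false found

def pyIstitle (s : String) : Bool := pyIstitleAux s.toList false false

-- shared port of t[0].isupper(); on t = "" Python raises IndexError — excluded by Pre_.
def pyFirstUpper (s : String) : Bool :=
  match s.toList with
  | [] => false
  | c :: _ => PySem.Chars.isupper c

-- body of A's best_variant loop: if title_case: … elif first_capital: … else term_list[0]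
def chooseBestA (term_list : List String) : String :=
  let title_case := term_list.filter (fun t => pyIstitle t)
  let first_capital := term_list.filter (fun t => pyFirstUpper t)
  match title_case with
  | t :: _ => t
  | [] =>
    match first_capital with
    | t :: _ => t
    | [] => term_list.headD ""   -- term_list[0]; term_list is never [] (keys come from terms)

def deduplicate_case_insensitive (terms : List String) : List String :=
  let freq := PySem.Dict.counter (terms.map PySem.Str.lower)
  let variants := terms.foldl
    (fun d term => d.modify (PySem.Str.lower term) [] (fun l => l ++ [term]))
    (PySem.Dict.empty : PySem.Dict String (List String))
  let best_variant := variants.items.foldl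
    (fun (d : PySem.Dict String String) p => d.insert p.1 (chooseBestA p.2))
    PySem.Dict.empty
  PySem.List.sorted2 best_variant.values
    (fun t => -(freq.getD (PySem.Str.lower t) 0)) (fun t => PySem.Str.lower t)

-- ===== PORT B =====
def bCountStep (count : PySem.Dict String Int) (term : String) : PySem.Dict String Int :=
  let lower := PySem.Str.lower term
  count.insert lower (count.getD lower 0 + 1)

def bCandStep (cand : PySem.Dict String (Option String × Option String × String))
    (term : String) : PySem.Dict String (Option String × Option String × String) :=
  let lower := PySem.Str.lower term
  let isT := pyIstitle term
  let isU := pyFirstUpper term   -- term[0].isupper(); IndexError on "" excluded by Pre_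
  match cand.get? lower with
  | some (title, upper, first) =>
    cand.insert lower
      ((if title.isNone && isT then some term else title),
       (if upper.isNone && isU then some term else upper),
       first)
  | none =>
    cand.insert lower ((if isT then some term else none), (if isU then some term else none), term)

def bPick (p : Option String × Option String × String) : String :=
  match p with
  | (some t, _, _) => t
  | (none, some u, _) => u
  | (none, none, f) => f

def deduplicate_case_insensitive_alt (terms : List String) : List String :=
  let st := terms.foldl (fun st term => (bCountStep st.1 term, bCandStep st.2 term))
    ((PySem.Dict.empty, PySem.Dict.empty) :
      PySem.Dict String Int × PySem.Dict String (Option String × Option String × String))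
  let best := st.2.values.map bPick
  PySem.List.sorted2 best
    (fun s => -(st.1.getD (PySem.Str.lower s) 0)) (fun s => PySem.Str.lower s)

-- ===== PRECONDITION & SPEC =====
-- Pre_ excludes exactly the inputs on which A raises: any list containing the empty
-- string makes A's t[0] raise IndexError (B's term[0] raises there too).
def Pre_deduplicate_case_insensitive (terms : List String) : Prop := "" ∉ terms
instance (terms : List String) : Decidable (Pre_deduplicate_case_insensitive terms) := by
  unfold Pre_deduplicate_case_insensitive; infer_instance

def pvWitness_deduplicate_case_insensitive : List String := ["Foo", "foo", "BAR", "bar", "bar"]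

def Spec_deduplicate_case_insensitive (terms : List String) (out : List String) : Prop := out = deduplicate_case_insensitive_alt terms
instance (terms : List String) (out : List String) : Decidable (Spec_deduplicate_case_insensitive terms out) := by unfold Spec_deduplicate_case_insensitive; infer_instance

-- ===== CLAIM (what is proved, stated in full; the proofs are below) =====
def Claim_equal_deduplicate_case_insensitive : Prop := ∀ (terms : List String), Dom_deduplicate_case_insensitive terms → Pre_deduplicate_case_insensitive terms → Spec_deduplicate_case_insensitive terms (deduplicate_case_insensitive terms)

-- ===== LEMMAS AND PROOFS =====

-- per-key aggregation state transition of B's cand dict, as a pure function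
def mkSt (o : Option (Option String × Option String × String)) (t : String) :
    Option String × Option String × String :=
  match o with
  | none => ((if pyIstitle t then some t else none), (if pyFirstUpper t then some t else none), t)
  | some (a, b, f) =>
    ((if a.isNone && pyIstitle t then some t else a),
     (if b.isNone && pyFirstUpper t then some t else b), f)

def firstT (lst : List String) : Option String := (lst.filter (fun t => pyIstitle t)).head?
def firstU (lst : List String) : Option String := (lst.filter (fun t => pyFirstUpper t)).head?

theorem bCandStep_eq : bCandStep = fun d t =>
    d.insert (PySem.Str.lower t) (mkSt (d.get? (PySem.Str.lower t)) t) := by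
  funext d t
  simp only [bCandStep, mkSt]
  rcases h : d.get? (PySem.Str.lower t) with _ | ⟨a, b, f⟩ <;> simp

theorem get?_foldl_cand (terms : List String)
    (d : PySem.Dict String (Option String × Option String × String)) (c : String) :
    (terms.foldl (fun d t => d.insert (PySem.Str.lower t) (mkSt (d.get? (PySem.Str.lower t)) t)) d).get? c =
    (terms.filter (fun t => PySem.Str.lower t == c)).foldl (fun o t => some (mkSt o t)) (d.get? c) := by
  induction terms generalizing d with
  | nil => rfl
  | cons x xs ih =>
    simp only [List.foldl_cons, List.filter_cons]
    by_cases h : PySem.Str.lower x = c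
    · simp [h, ih, PySem.Dict.get?_insert_self]
    · have hb : (PySem.Str.lower x == c) = false := by simpa using h
      simp [hb, ih, PySem.Dict.get?_insert_of_ne _ _ (fun hc => h hc.symm)]

theorem foldl_mkSt_some (lst : List String) (a b : Option String) (f : String) :
    lst.foldl (fun o t => some (mkSt o t)) (some (a, b, f)) =
    some (a.or (firstT lst), b.or (firstU lst), f) := by
  induction lst generalizing a b with
  | nil => simp [firstT, firstU]
  | cons x xs ih =>
    rw [List.foldl_cons]
    have hstep : mkSt (some (a, b, f)) x =
        (a.or (if pyIstitle x then some x else none),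
         b.or (if pyFirstUpper x then some x else none), f) := by
      cases a <;> cases b <;> simp [mkSt]
    rw [hstep, ih]
    have hT : firstT (x :: xs) = (if pyIstitle x then some x else none).or (firstT xs) := by
      by_cases h : pyIstitle x <;> simp [firstT, h]
    have hU : firstU (x :: xs) = (if pyFirstUpper x then some x else none).or (firstU xs) := by
      by_cases h : pyFirstUpper x <;> simp [firstU, h]
    rw [hT, hU, Option.or_assoc, Option.or_assoc]

theorem foldl_mkSt_none (x : String) (xs : List String) :
    (x :: xs).foldl (fun o t => some (mkSt o t)) none =
    some (firstT (x :: xs), firstU (x :: xs), x) := by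
  rw [List.foldl_cons]
  have hstep : mkSt none x =
      ((if pyIstitle x then some x else none), (if pyFirstUpper x then some x else none), x) := rfl
  rw [hstep, foldl_mkSt_some]
  have hT : firstT (x :: xs) = (if pyIstitle x then some x else none).or (firstT xs) := by
    by_cases h : pyIstitle x <;> simp [firstT, h]
  have hU : firstU (x :: xs) = (if pyFirstUpper x then some x else none).or (firstU xs) := by
    by_cases h : pyFirstUpper x <;> simp [firstU, h]
  rw [hT, hU]

theorem pick_eq_choose (x : String) (xs : List String) :
    bPick (firstT (x :: xs), firstU (x :: xs), x) = chooseBestA (x :: xs) := by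
  simp only [firstT, firstU, chooseBestA]
  cases h1 : (x :: xs).filter (fun t => pyIstitle t) <;>
    cases h2 : (x :: xs).filter (fun t => pyFirstUpper t) <;>
      simp [bPick]

-- A's variants dict: value at key c is the sublist of terms whose lower is c
theorem variants_getD (terms : List String) (c : String) :
    (terms.foldl (fun d term => d.modify (PySem.Str.lower term) [] (fun l => l ++ [term]))
      (PySem.Dict.empty : PySem.Dict String (List String))).getD c [] =
    terms.filter (fun t => PySem.Str.lower t == c) := by
  have h := PySem.Dict.getD_foldl_modify_append
    (terms.map (fun t => (PySem.Str.lower t, t)))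
    (PySem.Dict.empty : PySem.Dict String (List String)) c
  rw [List.foldl_map] at h
  simpa [List.filter_map, List.map_map, Function.comp_def] using h

theorem variants_keys (terms : List String) :
    (terms.foldl (fun d term => d.modify (PySem.Str.lower term) [] (fun l => l ++ [term]))
      (PySem.Dict.empty : PySem.Dict String (List String))).keys =
    PySem.Set.ofList (terms.map PySem.Str.lower) := by
  have h := PySem.Dict.keys_foldl_modify_key terms PySem.Str.lower []
    (fun _ term => fun l => l ++ [term])
    (PySem.Dict.empty : PySem.Dict String (List String))
  simpa [PySem.Set.update_nil_left] using h

theorem variants_keys_nodup (terms : List String) :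
    (terms.foldl (fun d term => d.modify (PySem.Str.lower term) [] (fun l => l ++ [term]))
      (PySem.Dict.empty : PySem.Dict String (List String))).keys.Nodup := by
  exact PySem.Dict.nodup_keys_foldl_modify_key terms PySem.Str.lower []
    (fun _ term => fun l => l ++ [term]) _ (by simp)

-- B's cand dict keys
theorem cand_keys (terms : List String) :
    (terms.foldl bCandStep
      (PySem.Dict.empty : PySem.Dict String (Option String × Option String × String))).keys =
    PySem.Set.ofList (terms.map PySem.Str.lower) := by
  rw [bCandStep_eq]
  have h := PySem.Dict.keys_foldl_insert_key terms PySem.Str.lower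
    (fun d t => mkSt (d.get? (PySem.Str.lower t)) t)
    (PySem.Dict.empty : PySem.Dict String (Option String × Option String × String))
  simpa [PySem.Set.update_nil_left] using h

theorem cand_keys_nodup (terms : List String) :
    (terms.foldl bCandStep
      (PySem.Dict.empty : PySem.Dict String (Option String × Option String × String))).keys.Nodup := by
  rw [bCandStep_eq]
  exact PySem.Dict.nodup_keys_foldl_insert_key terms PySem.Str.lower
    (fun d t => mkSt (d.get? (PySem.Str.lower t)) t) _ (by simp)

-- the two best-variant value lists coincide
theorem best_lists_eq (terms : List String) :
    ((terms.foldl bCandStep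
      (PySem.Dict.empty : PySem.Dict String (Option String × Option String × String))).values).map bPick =
    ((terms.foldl (fun d term => d.modify (PySem.Str.lower term) [] (fun l => l ++ [term]))
        (PySem.Dict.empty : PySem.Dict String (List String))).items.foldl
      (fun (d : PySem.Dict String String) p => d.insert p.1 (chooseBestA p.2))
      PySem.Dict.empty).values := by
  -- A side: best_variant.values = variants.items.map (chooseBestA ∘ ·.2)
  set variants := terms.foldl
    (fun d term => d.modify (PySem.Str.lower term) [] (fun l => l ++ [term]))
    (PySem.Dict.empty : PySem.Dict String (List String)) with hvar
  have hAitems : (variants.items.foldl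
      (fun (d : PySem.Dict String String) p => d.insert p.1 (chooseBestA p.2))
      PySem.Dict.empty).items = variants.items.map (fun p => (p.1, chooseBestA p.2)) := by
    have h := PySem.Dict.items_foldl_insert_fresh variants.items (fun p => p.1)
      (fun p => chooseBestA p.2) (PySem.Dict.empty : PySem.Dict String String)
      (by intro a _; simp) (by
        have : variants.items.map (fun p => p.1) = variants.keys := rfl
        rw [this]; exact variants_keys_nodup terms)
    simpa using h
  have hAvalues : (variants.items.foldl
      (fun (d : PySem.Dict String String) p => d.insert p.1 (chooseBestA p.2))
      PySem.Dict.empty).values = variants.items.map (fun p => chooseBestA p.2) := by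
    have : ∀ (d : PySem.Dict String String), d.values = d.items.map (fun p => p.2) := fun _ => rfl
    rw [this, hAitems, List.map_map]
    simp [Function.comp_def]
  have hvitems : variants.items =
      (PySem.Set.ofList (terms.map PySem.Str.lower)).map (fun k => (k, variants.getD k [])) := by
    have := PySem.Dict.items_eq_map_keys variants (variants_keys_nodup terms) ([] : List String)
    rwa [hvar, variants_keys] at this
  -- B side
  set cand := terms.foldl bCandStep
    (PySem.Dict.empty : PySem.Dict String (Option String × Option String × String)) with hcand
  have hBvalues : cand.values =
      (PySem.Set.ofList (terms.map PySem.Str.lower)).map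
        (fun k => cand.getD k (none, none, "")) := by
    have := PySem.Dict.values_eq_map_keys cand (cand_keys_nodup terms)
      ((none, none, "") : Option String × Option String × String)
    rwa [hcand, cand_keys] at this
  rw [hAvalues, hBvalues, hvitems, List.map_map, List.map_map]
  apply List.map_congr_left
  intro k hk
  -- k comes from some term, so the filtered list is nonempty
  obtain ⟨t, ht, hlt⟩ : ∃ t ∈ terms, PySem.Str.lower t = k := by
    have := (PySem.Set.mem_ofList (terms.map PySem.Str.lower) k).mp hk
    simpa using this
  have hfilter : t ∈ terms.filter (fun t => PySem.Str.lower t == k) := by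
    simp [List.mem_filter, ht, hlt]
  rcases hcons : terms.filter (fun t => PySem.Str.lower t == k) with _ | ⟨x, xs⟩
  · rw [hcons] at hfilter; simp at hfilter
  · have hget : cand.get? k = some (firstT (x :: xs), firstU (x :: xs), x) := by
      rw [hcand, bCandStep_eq, get?_foldl_cand, PySem.Dict.get?_empty, hcons, foldl_mkSt_none]
    have hgetD : cand.getD k (none, none, "") = (firstT (x :: xs), firstU (x :: xs), x) := by
      rw [PySem.Dict.getD_eq_get?_getD, hget]; rfl
    have hvd : variants.getD k [] = x :: xs := by rw [hvar, variants_getD, hcons]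
    simp only [Function.comp_apply, hgetD, hvd, pick_eq_choose]

-- B's count dict is A's Counter
theorem count_eq_counter (terms : List String) :
    terms.foldl bCountStep PySem.Dict.empty = PySem.Dict.counter (terms.map PySem.Str.lower) := by
  rw [← PySem.Dict.foldl_insert_getD_add_one_eq_counter, List.foldl_map]
  rfl

-- ===== VERDICT (by name: the statement is the Claim_ definition above) =====
theorem deduplicate_case_insensitive_spec : Claim_equal_deduplicate_case_insensitive := by
  intro terms _ _
  unfold Spec_deduplicate_case_insensitive
  unfold deduplicate_case_insensitive deduplicate_case_insensitive_alt
  rw [PySem.List.foldl_prod_mk]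
  simp only [count_eq_counter, best_lists_eq]
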